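-- pv_equiv track=rewrite | github.com/dhayanesh/distributed-parallel-text-processor | multiThread_solution.py | count_words_in_chunk
-- ===== SOURCE A (Python) =====
-- from collections import defaultdict
--
-- def count_words_in_chunk(chunk, predefined_words):
--     """
--     Counts occurrences of predefined words in a chunk of text.
--     """
--     word_count = defaultdict(int)
--     for line in chunk:
--         words = line.strip().split()
--         for word in words:
--             if word in predefined_words:
--                 word_count[word] += 1
--     return word_count
-- ===== SOURCE B (Python) =====
-- from collections import defaultdict
--
-- def count_words_in_chunk(chunk, predefined_words):
--     """Staged passes: flatten all words, collect the occurring predefined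
--     words in first-occurrence order, then count each with list.count."""
--     words = [w for line in chunk for w in line.strip().split()]
--     pset = set(predefined_words)
--     order = []
--     for w in words:
--         if w in pset and w not in order:
--             order.append(w)
--     return defaultdict(int, {w: words.count(w) for w in order})
-- ===== Notes on version B (the rewrite author's own statement) =====
-- stated objective: alternative
-- what changed: A counts incrementally in one pass (per word: membership scan then dict increment); B works in staged passes with no incremental counter: flatten all words, build the list of occurring predefined words in first-occurrence order, then compute each count by a full list.count scan.
import Mathlib
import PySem

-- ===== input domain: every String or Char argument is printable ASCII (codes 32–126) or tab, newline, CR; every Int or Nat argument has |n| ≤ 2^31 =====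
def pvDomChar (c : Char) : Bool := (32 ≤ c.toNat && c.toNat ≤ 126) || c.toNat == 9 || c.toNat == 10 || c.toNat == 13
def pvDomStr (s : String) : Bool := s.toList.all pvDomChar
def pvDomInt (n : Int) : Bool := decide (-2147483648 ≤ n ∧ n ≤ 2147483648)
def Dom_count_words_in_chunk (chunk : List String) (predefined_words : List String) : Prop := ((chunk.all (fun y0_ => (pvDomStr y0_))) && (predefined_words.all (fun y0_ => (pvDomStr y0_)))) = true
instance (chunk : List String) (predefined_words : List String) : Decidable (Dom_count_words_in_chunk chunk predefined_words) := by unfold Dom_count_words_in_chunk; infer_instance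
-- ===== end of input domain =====

-- B replaces A's single incremental counting pass by staged passes: flatten the words,
-- list the occurring predefined words in first-occurrence order, then count each by a scan.

-- ===== PORT A =====
-- literal transliteration of A: per line, per word, membership test then dict increment
def count_words_in_chunk (chunk : List String) (predefined_words : List String) : List (String × Int) :=
  (chunk.foldl (fun word_count line =>
      (PySem.Str.split₀ (PySem.Str.strip line)).foldl (fun word_count word =>
        if word ∈ predefined_words then word_count.modify word 0 (· + 1) else word_count)
        word_count)
    PySem.Dict.empty).items

-- ===== PORT B =====
-- literal transliteration of B: flatten, collect first-occurrence order, then count each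
def count_words_in_chunk_alt (chunk : List String) (predefined_words : List String) : List (String × Int) :=
  let words : List String :=
    chunk.foldl (fun ws line => ws ++ PySem.Str.split₀ (PySem.Str.strip line)) []
  let pset : PySem.Set String := PySem.Set.ofList predefined_words
  let order : List String :=
    words.foldl (fun order w =>
      if PySem.Set.contains pset w && !(order.contains w) then order ++ [w] else order) []
  order.map (fun w => (w, (PySem.List.count words w : Int)))

-- ===== PRECONDITION & SPEC =====
def Spec_count_words_in_chunk (chunk : List String) (predefined_words : List String) (out : List (String × Int)) : Prop := out = count_words_in_chunk_alt chunk predefined_words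
instance (chunk : List String) (predefined_words : List String) (out : List (String × Int)) : Decidable (Spec_count_words_in_chunk chunk predefined_words out) := by unfold Spec_count_words_in_chunk; infer_instance

-- ===== CLAIM (what is proved, stated in full; the proofs are below) =====
def Claim_equal_count_words_in_chunk : Prop := ∀ (chunk : List String) (predefined_words : List String), Dom_count_words_in_chunk chunk predefined_words → Spec_count_words_in_chunk chunk predefined_words (count_words_in_chunk chunk predefined_words)

-- ===== LEMMAS AND PROOFS =====

-- A's nested per-line fold is the fold over the flattened word list
theorem pvFlatA (g : String → List String) (f : PySem.Dict String Int → String → PySem.Dict String Int)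
    (chunk : List String) (d : PySem.Dict String Int) :
    chunk.foldl (fun d line => (g line).foldl f d) d = (chunk.flatMap g).foldl f d := by
  induction chunk generalizing d with
  | nil => rfl
  | cons line rest ih => simp only [List.foldl_cons, List.flatMap_cons, List.foldl_append, ih]

-- A's guarded counting step is counting over the filtered list
theorem pvStepA_eq (pred : List String) :
    (fun (d : PySem.Dict String Int) (w : String) =>
        if w ∈ pred then d.modify w 0 (· + 1) else d) =
      (fun d w => if decide (w ∈ pred) = true then d.modify w 0 (· + 1) else d) := by
  funext d w
  by_cases hw : w ∈ pred <;> simp [hw]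

-- B's guarded first-occurrence step is Set.add over the filtered list
theorem pvStepB_eq (pred : List String) :
    (fun (o : List String) (w : String) =>
        if PySem.Set.contains (PySem.Set.ofList pred) w && !(o.contains w) then o ++ [w] else o) =
      (fun o w => if decide (w ∈ pred) = true then PySem.Set.add o w else o) := by
  funext o w
  by_cases hw : w ∈ pred <;> by_cases ho : w ∈ o <;>
    simp [PySem.Set.contains_eq_listContains, PySem.Set.mem_ofList, hw, ho]

-- ===== VERDICT (by name: the statement is the Claim_ definition above) =====
theorem count_words_in_chunk_spec : Claim_equal_count_words_in_chunk := by
  intro chunk pred _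
  show count_words_in_chunk chunk pred = count_words_in_chunk_alt chunk pred
  simp only [count_words_in_chunk, count_words_in_chunk_alt]
  rw [PySem.List.foldl_append_eq_flatMap, List.nil_append]
  set g : String → List String := fun line => PySem.Str.split₀ (PySem.Str.strip line) with hg
  set words : List String := chunk.flatMap g with hwords
  rw [pvFlatA g, ← hwords, pvStepA_eq pred, pvStepB_eq pred,
    ← List.foldl_filter, ← List.foldl_filter, ← PySem.Set.ofList_eq_foldl,
    ← PySem.Dict.counter_eq_foldl, PySem.Dict.items_counter]
  refine List.map_congr_left ?_
  intro k hk
  have hkf : k ∈ words.filter (fun w => decide (w ∈ pred)) := (PySem.Set.mem_ofList _ k).mp hk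
  have hpk : decide (k ∈ pred) = true := by simpa using (List.mem_filter.mp hkf).2
  rw [PySem.List.count_eq, List.count_filter (l := words) hpk]
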